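-- pv_equiv track=rewrite | github.com/kkutysllb/kk_KClaw | agent/anthropic_adapter.py | _get_anthropic_max_output
-- ===== SOURCE A (Python) =====
-- _ANTHROPIC_OUTPUT_LIMITS = {
--     # Claude 4.6
--     "claude-opus-4-6":   128_000,
--     "claude-sonnet-4-6":  64_000,
--     # Claude 4.5
--     "claude-opus-4-5":    64_000,
--     "claude-sonnet-4-5":  64_000,
--     "claude-haiku-4-5":   64_000,
--     # Claude 4
--     "claude-opus-4":      32_000,
--     "claude-sonnet-4":    64_000,
--     # Claude 3.7
--     "claude-3-7-sonnet": 128_000,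
--     # Claude 3.5
--     "claude-3-5-sonnet":   8_192,
--     "claude-3-5-haiku":    8_192,
--     # Claude 3
--     "claude-3-opus":       4_096,
--     "claude-3-sonnet":     4_096,
--     "claude-3-haiku":      4_096,
-- }
--
-- _ANTHROPIC_DEFAULT_OUTPUT_LIMIT = 128_000
--
-- def _get_anthropic_max_output(model: str) -> int:
--     """查找 Anthropic 模型的最大输出 token 限制。
--
--     使用与 _ANTHROPIC_OUTPUT_LIMITS 的子字符串匹配，以便带日期戳的
--     模型 ID（claude-sonnet-4-5-20250929）和变体后缀（:1m, :fast）
--     能正确解析。最长前缀匹配优先，避免如 "claude-3-5"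
--     在 "claude-3-5-sonnet" 之前匹配。
--     """
--     m = model.lower()
--     best_key = ""
--     best_val = _ANTHROPIC_DEFAULT_OUTPUT_LIMIT
--     for key, val in _ANTHROPIC_OUTPUT_LIMITS.items():
--         if key in m and len(key) > len(best_key):
--             best_key = key
--             best_val = val
--     return best_val
-- ===== SOURCE B (Python) =====
-- _ANTHROPIC_OUTPUT_LIMITS = {
--     "claude-opus-4-6":   128_000,
--     "claude-sonnet-4-6":  64_000,
--     "claude-opus-4-5":    64_000,
--     "claude-sonnet-4-5":  64_000,
--     "claude-haiku-4-5":   64_000,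
--     "claude-opus-4":      32_000,
--     "claude-sonnet-4":    64_000,
--     "claude-3-7-sonnet": 128_000,
--     "claude-3-5-sonnet":   8_192,
--     "claude-3-5-haiku":    8_192,
--     "claude-3-opus":       4_096,
--     "claude-3-sonnet":     4_096,
--     "claude-3-haiku":      4_096,
-- }
--
-- _ANTHROPIC_DEFAULT_OUTPUT_LIMIT = 128_000
--
--
-- def _get_anthropic_max_output(model: str) -> int:
--     m = model.lower()
--     # Stable sort by descending key length: among equal-length keys the
--     # insertion order is preserved, so the first substring match is exactly
--     # the longest-prefix winner; short-circuit on the first hit.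
--     for key, val in sorted(_ANTHROPIC_OUTPUT_LIMITS.items(),
--                            key=lambda kv: len(kv[0]), reverse=True):
--         if key in m:
--             return val
--     return _ANTHROPIC_DEFAULT_OUTPUT_LIMIT
-- ===== Notes on version B (the rewrite author's own statement) =====
-- stated objective: simpler
-- what changed: Replaces the max-tracking fold over the dict with a stable sort of the items by descending key length followed by a short-circuiting first-substring-match scan (insertion order breaks length ties exactly as A's strict '>' does).
import Mathlib
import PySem

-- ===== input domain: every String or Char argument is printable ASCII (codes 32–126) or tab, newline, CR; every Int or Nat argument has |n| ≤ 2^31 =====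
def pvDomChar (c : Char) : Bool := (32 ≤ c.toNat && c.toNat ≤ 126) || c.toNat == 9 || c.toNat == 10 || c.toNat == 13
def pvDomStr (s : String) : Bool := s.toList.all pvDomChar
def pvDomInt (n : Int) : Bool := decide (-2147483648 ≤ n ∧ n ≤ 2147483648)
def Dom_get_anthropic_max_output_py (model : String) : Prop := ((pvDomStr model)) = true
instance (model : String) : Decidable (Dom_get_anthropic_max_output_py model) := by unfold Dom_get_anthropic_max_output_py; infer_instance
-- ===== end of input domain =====

set_option maxRecDepth 4000
set_option maxHeartbeats 2000000


-- B replaces A's max-tracking fold by a stable length-descending sort plus first-match scan; same result, simpler control flow.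

-- module-level dict _ANTHROPIC_OUTPUT_LIMITS (insertion order)
def pvAnthropicLimits : List (String × Int) :=
  [("claude-opus-4-6",   128000),
   ("claude-sonnet-4-6",  64000),
   ("claude-opus-4-5",    64000),
   ("claude-sonnet-4-5",  64000),
   ("claude-haiku-4-5",   64000),
   ("claude-opus-4",      32000),
   ("claude-sonnet-4",    64000),
   ("claude-3-7-sonnet", 128000),
   ("claude-3-5-sonnet",   8192),
   ("claude-3-5-haiku",    8192),
   ("claude-3-opus",       4096),
   ("claude-3-sonnet",     4096),
   ("claude-3-haiku",      4096)]

-- ===== PORT A =====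
def get_anthropic_max_output_py (model : String) : Int :=
  let m := PySem.Str.lower model
  let best := pvAnthropicLimits.foldl
    (fun (b : String × Int) (kv : String × Int) =>
      if PySem.Str.isIn kv.1 m && decide (PySem.Str.len kv.1 > PySem.Str.len b.1)
      then kv else b)
    ("", 128000)
  best.2

-- ===== PORT B =====
def get_anthropic_max_output_py_alt (model : String) : Int :=
  let m := PySem.Str.lower model
  match (PySem.List.sorted pvAnthropicLimits (fun kv => PySem.Str.len kv.1) true).find?
          (fun kv => PySem.Str.isIn kv.1 m) with
  | some kv => kv.2
  | none => 128000

-- ===== PRECONDITION & SPEC =====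
def Spec_get_anthropic_max_output_py (model : String) (out : Int) : Prop := out = get_anthropic_max_output_py_alt model
instance (model : String) (out : Int) : Decidable (Spec_get_anthropic_max_output_py model out) := by unfold Spec_get_anthropic_max_output_py; infer_instance

-- ===== CLAIM (what is proved, stated in full; the proofs are below) =====
def Claim_equal_get_anthropic_max_output_py : Prop := ∀ (model : String), Dom_get_anthropic_max_output_py model → Spec_get_anthropic_max_output_py model (get_anthropic_max_output_py model)

-- ===== LEMMAS AND PROOFS =====

-- Proof-side reflections: the fold with precomputed match-bits and key lengths,
-- and the first-match scan with precomputed match-bits.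
def pvRun : List (Bool × Int × Int) → Int → Int → Int
  | [], _, bv => bv
  | (c, kl, v) :: rest, bl, bv => if c && decide (kl > bl) then pvRun rest kl v else pvRun rest bl bv

def pvFind : List (Bool × Int) → Int
  | [] => 128000
  | (c, v) :: rest => if c then v else pvFind rest

theorem pv_fold_run (p : String → Bool) (l : List (String × Int)) (b : String × Int) :
    (l.foldl
      (fun (b : String × Int) (kv : String × Int) =>
        if p kv.1 && decide (PySem.Str.len kv.1 > PySem.Str.len b.1) then kv else b) b).2
    = pvRun (l.map fun kv => (p kv.1, PySem.Str.len kv.1, kv.2)) (PySem.Str.len b.1) b.2 := by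
  induction l generalizing b with
  | nil => rfl
  | cons kv rest ih =>
      simp only [List.foldl_cons, List.map_cons, pvRun]
      by_cases h : (p kv.1 && decide (PySem.Str.len kv.1 > PySem.Str.len b.1)) = true
      · rw [if_pos h, if_pos h]; exact ih kv
      · rw [if_neg h, if_neg h]; exact ih b

theorem pv_find_run (p : String → Bool) (l : List (String × Int)) :
    (match l.find? (fun kv => p kv.1) with
     | some kv => kv.2
     | none => (128000 : Int))
    = pvFind (l.map fun kv => (p kv.1, kv.2)) := by
  induction l with
  | nil => rfl
  | cons kv rest ih =>
      simp only [List.map_cons, pvFind, List.find?_cons]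
      by_cases h : p kv.1 = true
      · rw [if_pos h]; simp only [List.find?_cons, h]
      · rw [if_neg h]; simp only [List.find?_cons, Bool.not_eq_true] at *
        simp only [h]; exact ih

theorem pv_main (p : String → Bool) :
    (pvAnthropicLimits.foldl
      (fun (b : String × Int) (kv : String × Int) =>
        if p kv.1 && decide (PySem.Str.len kv.1 > PySem.Str.len b.1) then kv else b)
      ("", 128000)).2
    = (match (PySem.List.sorted pvAnthropicLimits (fun kv => PySem.Str.len kv.1) true).find?
            (fun kv => p kv.1) with
       | some kv => kv.2
       | none => (128000 : Int)) := by
  have hs : PySem.List.sorted pvAnthropicLimits (fun kv => PySem.Str.len kv.1) true =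
      [("claude-sonnet-4-6", (64000:Int)), ("claude-sonnet-4-5", 64000),
       ("claude-3-7-sonnet", 128000), ("claude-3-5-sonnet", 8192),
       ("claude-haiku-4-5", 64000), ("claude-3-5-haiku", 8192),
       ("claude-opus-4-6", 128000), ("claude-opus-4-5", 64000),
       ("claude-sonnet-4", 64000), ("claude-3-sonnet", 4096),
       ("claude-3-haiku", 4096), ("claude-opus-4", 32000),
       ("claude-3-opus", 4096)] := by decide
  rw [hs, pv_fold_run p, pv_find_run p]
  have htrip : pvAnthropicLimits.map (fun kv => (p kv.1, PySem.Str.len kv.1, kv.2)) =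
      [(p "claude-opus-4-6", 15, 128000), (p "claude-sonnet-4-6", 17, 64000),
       (p "claude-opus-4-5", 15, 64000), (p "claude-sonnet-4-5", 17, 64000),
       (p "claude-haiku-4-5", 16, 64000), (p "claude-opus-4", 13, 32000),
       (p "claude-sonnet-4", 15, 64000), (p "claude-3-7-sonnet", 17, 128000),
       (p "claude-3-5-sonnet", 17, 8192), (p "claude-3-5-haiku", 16, 8192),
       (p "claude-3-opus", 13, 4096), (p "claude-3-sonnet", 15, 4096),
       (p "claude-3-haiku", 14, 4096)] := rfl
  have hpair : ([("claude-sonnet-4-6", (64000:Int)), ("claude-sonnet-4-5", 64000),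
       ("claude-3-7-sonnet", 128000), ("claude-3-5-sonnet", 8192),
       ("claude-haiku-4-5", 64000), ("claude-3-5-haiku", 8192),
       ("claude-opus-4-6", 128000), ("claude-opus-4-5", 64000),
       ("claude-sonnet-4", 64000), ("claude-3-sonnet", 4096),
       ("claude-3-haiku", 4096), ("claude-opus-4", 32000),
       ("claude-3-opus", 4096)].map fun kv => (p kv.1, kv.2)) =
      [(p "claude-sonnet-4-6", (64000:Int)), (p "claude-sonnet-4-5", 64000),
       (p "claude-3-7-sonnet", 128000), (p "claude-3-5-sonnet", 8192),
       (p "claude-haiku-4-5", 64000), (p "claude-3-5-haiku", 8192),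
       (p "claude-opus-4-6", 128000), (p "claude-opus-4-5", 64000),
       (p "claude-sonnet-4", 64000), (p "claude-3-sonnet", 4096),
       (p "claude-3-haiku", 4096), (p "claude-opus-4", 32000),
       (p "claude-3-opus", 4096)] := rfl
  rw [htrip, hpair]
  have hz : PySem.Str.len (("", (128000:Int)).1) = 0 := rfl
  rw [hz]
  generalize p "claude-opus-4-6" = c1, p "claude-sonnet-4-6" = c2, p "claude-opus-4-5" = c3, p "claude-sonnet-4-5" = c4, p "claude-haiku-4-5" = c5, p "claude-opus-4" = c6, p "claude-sonnet-4" = c7, p "claude-3-7-sonnet" = c8, p "claude-3-5-sonnet" = c9, p "claude-3-5-haiku" = c10, p "claude-3-opus" = c11, p "claude-3-sonnet" = c12, p "claude-3-haiku" = c13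
  revert c1 c2 c3 c4 c5 c6 c7 c8 c9 c10 c11 c12 c13
  decide

-- ===== VERDICT (by name: the statement is the Claim_ definition above) =====
theorem get_anthropic_max_output_py_spec : Claim_equal_get_anthropic_max_output_py := by
  intro model _
  unfold Spec_get_anthropic_max_output_py get_anthropic_max_output_py get_anthropic_max_output_py_alt
  exact pv_main (fun k => PySem.Str.isIn k (PySem.Str.lower model))
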